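-- pv_equiv track=rewrite | github.com/benquick123/code-profiling | code/batch-1/vse-naloge-brez-testov/DN7-Z-184.py | varen_premik
-- ===== SOURCE A (Python) =====
-- def varen_premik(x0, y0, x1, y1, mine):
--     """
--     Vrni `True`, če je pomik z (x0, y0) and (x1, y1) varen, `False`, če ni.
--
--     Args:
--         x0 (int): koordinata x začetnega polja
--         y0 (int): koordinata y začetnega polja
--         x1 (int): koordinata x končnega polja
--         y1 (int): koordinata y končnega polja
--         mine (set of tuple of int): koordinate min
--
--     Returns:
--         bool: `True`, če je premik varen, `False`, če ni.
--     """
--     korak = 1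
--     if (x1 - x0) < 0 or (y1 - y0) < 0:
--         korak = -1
--     for i in range(x0 ,x1+korak, korak):
--         for j in range(y0, y1+korak, korak):
--             if (i,j) in mine:
--                 return False
--     return True
-- ===== SOURCE B (Python) =====
-- def varen_premik(x0, y0, x1, y1, mine):
--     # B: instead of scanning the whole rectangle, scan the mine set once
--     # and test O(1) interval membership (same range semantics as A's loops).
--     if (x1 - x0) < 0 or (y1 - y0) < 0:
--         xlo, xhi, ylo, yhi = x1, x0, y1, y0
--     else:
--         xlo, xhi, ylo, yhi = x0, x1, y0, y1
--     return not any(xlo <= mx <= xhi and ylo <= my <= yhi for (mx, my) in mine)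
-- ===== Notes on version B (the rewrite author's own statement) =====
-- stated objective: faster
-- what changed: B replaces A's nested scan over every cell of the swept rectangle with a single pass over the mine set testing interval membership.
import Mathlib
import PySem

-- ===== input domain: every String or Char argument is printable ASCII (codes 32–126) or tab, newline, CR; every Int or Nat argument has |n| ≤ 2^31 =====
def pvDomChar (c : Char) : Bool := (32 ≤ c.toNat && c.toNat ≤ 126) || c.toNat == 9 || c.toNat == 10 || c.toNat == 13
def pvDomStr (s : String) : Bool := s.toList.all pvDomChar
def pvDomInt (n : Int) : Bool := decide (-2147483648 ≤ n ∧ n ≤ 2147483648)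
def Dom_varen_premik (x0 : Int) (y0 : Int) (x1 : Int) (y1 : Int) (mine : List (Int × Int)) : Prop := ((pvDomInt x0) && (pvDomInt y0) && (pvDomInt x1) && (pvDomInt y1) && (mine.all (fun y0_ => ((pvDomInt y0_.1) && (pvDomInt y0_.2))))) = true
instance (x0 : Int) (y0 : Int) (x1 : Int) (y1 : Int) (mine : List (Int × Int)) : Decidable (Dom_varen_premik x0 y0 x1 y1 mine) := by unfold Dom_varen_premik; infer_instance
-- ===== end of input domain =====

-- ===== PORT A =====
-- A: scans every cell of the swept rectangle (nested for-range loops with early return).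
-- pvLoop is the shape of A's 'for v in range(start, stop, korak): if p(v): return True' loop,
-- with fuel = the range's length; it stops at the first i with p i (Python's early 'return False').
def pvLoop (p : Int → Bool) (korak : Int) : Nat → Int → Bool
  | 0, _ => false
  | n + 1, i => if p i then true else pvLoop p korak n (i + korak)

def varen_premik (x0 : Int) (y0 : Int) (x1 : Int) (y1 : Int) (mine : List (Int × Int)) : Bool :=
  -- korak = -1 iff x1 - x0 < 0 or y1 - y0 < 0, else 1; the two branches are the two korak values
  if x1 - x0 < 0 ∨ y1 - y0 < 0 then
    !(pvLoop (fun i => pvLoop (fun j => mine.contains (i, j)) (-1) (y0 - (y1 - 1)).toNat y0)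
        (-1) (x0 - (x1 - 1)).toNat x0)
  else
    !(pvLoop (fun i => pvLoop (fun j => mine.contains (i, j)) 1 (y1 + 1 - y0).toNat y0)
        1 (x1 + 1 - x0).toNat x0)

-- ===== PORT B =====
-- B: one pass over the mine set, O(1) interval-membership test per mine.
def varen_premik_alt (x0 : Int) (y0 : Int) (x1 : Int) (y1 : Int) (mine : List (Int × Int)) : Bool :=
  if x1 - x0 < 0 ∨ y1 - y0 < 0 then
    !(mine.any fun m => decide (x1 ≤ m.1 ∧ m.1 ≤ x0 ∧ y1 ≤ m.2 ∧ m.2 ≤ y0))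
  else
    !(mine.any fun m => decide (x0 ≤ m.1 ∧ m.1 ≤ x1 ∧ y0 ≤ m.2 ∧ m.2 ≤ y1))

-- ===== PRECONDITION & SPEC =====
def Spec_varen_premik (x0 : Int) (y0 : Int) (x1 : Int) (y1 : Int) (mine : List (Int × Int)) (out : Bool) : Prop := out = varen_premik_alt x0 y0 x1 y1 mine
instance (x0 : Int) (y0 : Int) (x1 : Int) (y1 : Int) (mine : List (Int × Int)) (out : Bool) : Decidable (Spec_varen_premik x0 y0 x1 y1 mine out) := by unfold Spec_varen_premik; infer_instance

-- ===== CLAIM (what is proved, stated in full; the proofs are below) =====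
def Claim_equal_varen_premik : Prop := ∀ (x0 : Int) (y0 : Int) (x1 : Int) (y1 : Int) (mine : List (Int × Int)), Dom_varen_premik x0 y0 x1 y1 mine → Spec_varen_premik x0 y0 x1 y1 mine (varen_premik x0 y0 x1 y1 mine)

-- ===== LEMMAS AND PROOFS =====
-- pvLoop with fuel = range length is 'any' over the corresponding Python range.
theorem pvLoop_asc (p : Int → Bool) (b : Int) :
    ∀ (n : Nat) (a : Int), n = (b - a).toNat →
      pvLoop p 1 n a = (PySem.List.pyRange a b 1).any p
  | 0, a, h => by
      rw [PySem.List.pyRange_one_eq_nil (by omega)]; rfl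
  | n + 1, a, h => by
      rw [PySem.List.pyRange_one_cons (show a < b by omega), List.any_cons,
        pvLoop, pvLoop_asc p b n (a + 1) (by omega)]
      cases hc : p a <;> simp [hc]

theorem pvLoop_desc (p : Int → Bool) (b : Int) :
    ∀ (n : Nat) (a : Int), n = (a - b).toNat →
      pvLoop p (-1) n a = (PySem.List.pyRange a b (-1)).any p
  | 0, a, h => by
      rw [PySem.List.pyRange_neg_one_eq_nil (by omega)]; rfl
  | n + 1, a, h => by
      rw [PySem.List.pyRange_neg_one_cons (show b < a by omega), List.any_cons,
        show a - (1 : Int) = a + -1 from by ring, pvLoop,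
        pvLoop_desc p b n (a + -1) (by omega)]
      cases hc : p a <;> simp [hc]

theorem varen_premik_eq_alt (x0 y0 x1 y1 : Int) (mine : List (Int × Int)) :
    varen_premik x0 y0 x1 y1 mine = varen_premik_alt x0 y0 x1 y1 mine := by
  unfold varen_premik varen_premik_alt
  by_cases h : x1 - x0 < 0 ∨ y1 - y0 < 0
  · rw [if_pos h, if_pos h,
      pvLoop_desc _ (x1 - 1) _ x0 rfl, Bool.not_inj_iff, Bool.eq_iff_iff]
    have hin : ∀ i : Int, pvLoop (fun j => mine.contains (i, j)) (-1) (y0 - (y1 - 1)).toNat y0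
        = (PySem.List.pyRange y0 (y1 - 1) (-1)).any (fun j => mine.contains (i, j)) :=
      fun i => pvLoop_desc _ (y1 - 1) _ y0 rfl
    simp only [hin]
    simp only [List.any_eq_true, PySem.List.mem_pyRange_neg_one, decide_eq_true_eq,
      List.contains_eq_mem]
    constructor
    · rintro ⟨i, ⟨hi1, hi2⟩, j, ⟨hj1, hj2⟩, hm⟩
      exact ⟨(i, j), hm, by omega, by omega, by omega, by omega⟩
    · rintro ⟨⟨mx, my⟩, hm, h1, h2, h3, h4⟩
      exact ⟨mx, ⟨by omega, by omega⟩, my, ⟨by omega, by omega⟩, hm⟩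
  · rw [if_neg h, if_neg h,
      pvLoop_asc _ (x1 + 1) _ x0 rfl, Bool.not_inj_iff, Bool.eq_iff_iff]
    have hin : ∀ i : Int, pvLoop (fun j => mine.contains (i, j)) 1 (y1 + 1 - y0).toNat y0
        = (PySem.List.pyRange y0 (y1 + 1) 1).any (fun j => mine.contains (i, j)) :=
      fun i => pvLoop_asc _ (y1 + 1) _ y0 rfl
    simp only [hin]
    simp only [List.any_eq_true, PySem.List.mem_pyRange_one, decide_eq_true_eq,
      List.contains_eq_mem]
    constructor
    · rintro ⟨i, ⟨hi1, hi2⟩, j, ⟨hj1, hj2⟩, hm⟩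
      exact ⟨(i, j), hm, by omega, by omega, by omega, by omega⟩
    · rintro ⟨⟨mx, my⟩, hm, h1, h2, h3, h4⟩
      exact ⟨mx, ⟨by omega, by omega⟩, my, ⟨by omega, by omega⟩, hm⟩

-- ===== VERDICT (by name: the statement is the Claim_ definition above) =====
theorem varen_premik_spec : Claim_equal_varen_premik := by
  intro x0 y0 x1 y1 mine _
  unfold Spec_varen_premik
  exact varen_premik_eq_alt x0 y0 x1 y1 mine
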